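-- pv_equiv track=rewrite | github.com/kajigor/fl-2021-hse-win | solution/parser/main.py | get_assoc
-- ===== SOURCE A (Python) =====
-- def index_checking(s, index, arr):
--     if len(s) <= index:
--         return False
--     for i in arr:
--         if s[index] == i:
--             return False
--     return True
--
-- def get_assoc(s):
--     result = ""
--     index = 0
--     while index_checking(s, index, {'_'}):
--         index += 1
--     index += 1
--     while index_checking(s, index, {'_'}):
--         index += 1
--     index += 1
--     while index_checking(s, index, {' '}):
--         result += s[index]
--         index += 1
--     return result
-- ===== SOURCE B (Python) =====
-- def get_assoc(s):
--     i = s.find('_')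
--     if i < 0:
--         return ''
--     j = s.find('_', i + 1)
--     if j < 0:
--         return ''
--     rest = s[j + 1:]
--     k = rest.find(' ')
--     return rest if k < 0 else rest[:k]
-- ===== Notes on version B (the rewrite author's own statement) =====
-- stated objective: faster
-- what changed: Replaces the three index-stepping while-loops and the per-character index_checking helper with two library find calls locating the underscores, a slice to take the tail, and a find/slice pair cutting at the first space.
import Mathlib
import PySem

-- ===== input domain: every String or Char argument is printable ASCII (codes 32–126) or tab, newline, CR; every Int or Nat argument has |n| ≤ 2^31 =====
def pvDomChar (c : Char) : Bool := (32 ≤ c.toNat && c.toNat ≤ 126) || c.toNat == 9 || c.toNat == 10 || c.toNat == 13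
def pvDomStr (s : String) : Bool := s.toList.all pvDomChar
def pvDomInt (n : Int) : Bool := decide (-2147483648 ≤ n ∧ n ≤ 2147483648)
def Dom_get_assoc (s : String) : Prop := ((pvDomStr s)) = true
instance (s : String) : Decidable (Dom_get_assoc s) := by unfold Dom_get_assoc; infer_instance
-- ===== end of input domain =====

-- B replaces A's three index-stepping while-loops (and the per-character index_checking
-- helper) with two library find calls, a slice and a final find/slice cut at the first
-- space (same O(n) scan, measurably faster by a constant factor in Python).

-- ===== PORT A =====
-- helper index_checking(s, index, arr)
def indexChecking (cs : List Char) (index : Nat) (arr : List Char) : Bool :=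
  if cs.length ≤ index then false
  else arr.all (fun i => !(cs.getD index ' ' == i))

-- 'while index_checking(s, index, {'_'}): index += 1'
def skipLoop (cs : List Char) (index : Nat) : Nat :=
  if h : indexChecking cs index ['_'] then skipLoop cs (index + 1) else index
termination_by cs.length - index
decreasing_by
  simp only [indexChecking] at h
  split at h
  · exact absurd h (by simp)
  · omega

-- 'while index_checking(s, index, {' '}): result += s[index]; index += 1'
def collectLoop (cs : List Char) (index : Nat) (result : List Char) : List Char :=
  if h : indexChecking cs index [' '] then
    collectLoop cs (index + 1) (result ++ [cs.getD index ' '])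
  else result
termination_by cs.length - index
decreasing_by
  simp only [indexChecking] at h
  split at h
  · exact absurd h (by simp)
  · omega

def get_assoc (s : String) : String :=
  let cs := s.toList
  let i1 := skipLoop cs 0
  let i2 := skipLoop cs (i1 + 1)
  String.ofList (collectLoop cs (i2 + 1) [])

-- ===== PORT B =====
def get_assoc_alt (s : String) : String :=
  let i := PySem.Str.find s "_"
  if i < 0 then "" else
  let j := PySem.Str.findFrom s "_" (i + 1)
  if j < 0 then "" else
  let rest := PySem.Str.slice s (some (j + 1)) none
  let k := PySem.Str.find rest " "
  if k < 0 then rest else PySem.Str.slice rest none (some k)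

-- ===== PRECONDITION & SPEC =====
def Spec_get_assoc (s : String) (out : String) : Prop := out = get_assoc_alt s
instance (s : String) (out : String) : Decidable (Spec_get_assoc s out) := by unfold Spec_get_assoc; infer_instance

-- ===== CLAIM (what is proved, stated in full; the proofs are below) =====
def Claim_equal_get_assoc : Prop := ∀ (s : String), Dom_get_assoc s → Spec_get_assoc s (get_assoc s)

-- ===== LEMMAS AND PROOFS =====

theorem indexChecking_iff (cs : List Char) (i : Nat) (c : Char) :
    indexChecking cs i [c] = true ↔ i < cs.length ∧ cs.getD i ' ' ≠ c := by
  simp only [indexChecking]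
  split <;> simp <;> omega

theorem skipLoop_eq (cs : List Char) (i : Nat) :
    skipLoop cs i = i + ((cs.drop i).takeWhile (· != '_')).length := by
  rw [skipLoop]
  by_cases h : indexChecking cs i ['_'] = true
  · rw [dif_pos h, skipLoop_eq cs (i + 1)]
    obtain ⟨hlt, hne⟩ := (indexChecking_iff cs i '_').mp h
    rw [List.getD_eq_getElem cs ' ' hlt] at hne
    have hb : (cs[i] != '_') = true := by simpa using hne
    rw [List.drop_eq_getElem_cons hlt, List.takeWhile_cons, if_pos hb, List.length_cons]
    omega
  · rw [dif_neg h]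
    rcases Nat.lt_or_ge i cs.length with hlt | hge
    · have hc : cs.getD i ' ' = '_' := by
        by_contra hcc
        exact h ((indexChecking_iff cs i '_').mpr ⟨hlt, hcc⟩)
      rw [List.getD_eq_getElem cs ' ' hlt] at hc
      rw [List.drop_eq_getElem_cons hlt]
      simp [hc]
    · rw [List.drop_of_length_le hge]
      simp
termination_by cs.length - i
decreasing_by
  obtain ⟨hlt, _⟩ := (indexChecking_iff cs i '_').mp h
  omega

theorem collectLoop_eq (cs : List Char) (i : Nat) (res : List Char) :
    collectLoop cs i res = res ++ (cs.drop i).takeWhile (· != ' ') := by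
  rw [collectLoop]
  by_cases h : indexChecking cs i [' '] = true
  · rw [dif_pos h, collectLoop_eq cs (i + 1)]
    obtain ⟨hlt, hne⟩ := (indexChecking_iff cs i ' ').mp h
    rw [List.getD_eq_getElem cs ' ' hlt] at hne
    have hb : (cs[i] != ' ') = true := by simpa using hne
    rw [List.drop_eq_getElem_cons hlt, List.takeWhile_cons, if_pos hb]
    simp [List.getElem?_eq_getElem hlt]
  · rw [dif_neg h]
    rcases Nat.lt_or_ge i cs.length with hlt | hge
    · have hc : cs.getD i ' ' = ' ' := by
        by_contra hcc
        exact h ((indexChecking_iff cs i ' ').mpr ⟨hlt, hcc⟩)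
      rw [List.getD_eq_getElem cs ' ' hlt] at hc
      rw [List.drop_eq_getElem_cons hlt]
      simp [hc]
    · rw [List.drop_of_length_le hge]
      simp
termination_by cs.length - i
decreasing_by
  obtain ⟨hlt, _⟩ := (indexChecking_iff cs i ' ').mp h
  omega

-- first index where c occurs = length of takeWhile (· != c)
theorem takeWhile_ne_length_eq (c : Char) (l : List Char) (k : Nat)
    (hk : k < l.length) (hc : l[k] = c)
    (hmin : ∀ i, (hi : i < k) → l[i]'(by omega) ≠ c) :
    (l.takeWhile (· != c)).length = k := by
  induction l generalizing k with
  | nil => simp at hk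
  | cons x t ih =>
    cases k with
    | zero =>
      simp at hc
      simp [hc]
    | succ k' =>
      have hx : x ≠ c := by
        have := hmin 0 (by omega)
        simpa using this
      have hxb : (x != c) = true := by simpa using hx
      rw [List.takeWhile_cons, if_pos hxb, List.length_cons]
      have := ih k' (by simpa using hk) (by simpa using hc)
        (fun i hi => by have := hmin (i + 1) (by omega); simpa using this)
      omega

theorem singleton_prefix_drop (c : Char) (l : List Char) (k : Nat) :
    [c] <+: l.drop k ↔ l[k]? = some c := by
  rw [← List.head?_drop]
  cases h : (l.drop k) with
  | nil => simp
  | cons x t => simp [List.prefix_cons_iff, eq_comm]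

theorem find_singleton (c : Char) (l : List Char) (h : c ∈ l) :
    PySem.Chars.find l [c] = ((l.takeWhile (· != c)).length : Int) := by
  have hinf : [c] <:+: l := (List.singleton_infix_iff c l).mpr h
  have hnn : 0 ≤ PySem.Chars.find l [c] := (PySem.Chars.find_nonneg_iff l [c]).mpr hinf
  obtain ⟨hpre, hmin⟩ := PySem.Chars.find_spec hnn
  set k := (PySem.Chars.find l [c]).toNat with hkdef
  have hk : l[k]? = some c := (singleton_prefix_drop c l k).mp hpre
  have hklen : k < l.length := by
    by_contra hge
    rw [List.getElem?_eq_none (by omega)] at hk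
    simp at hk
  have hkel : l[k] = c := by
    rw [List.getElem?_eq_getElem hklen] at hk
    exact Option.some.inj hk
  have hmins : ∀ i, (hi : i < k) → l[i]'(by omega) ≠ c := by
    intro i hi hic
    exact hmin i hi ((singleton_prefix_drop c l i).mpr
      (by rw [List.getElem?_eq_getElem (by omega)]; exact congrArg some hic))
  rw [takeWhile_ne_length_eq c l k hklen hkel hmins]
  omega

theorem find_singleton_none (c : Char) (l : List Char) (h : c ∉ l) :
    PySem.Chars.find l [c] = -1 := by
  rw [PySem.Chars.find_eq_neg_one_iff]
  rw [List.singleton_infix_iff]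
  exact h

theorem takeWhile_ne_all (c : Char) (l : List Char) (h : c ∉ l) :
    l.takeWhile (· != c) = l :=
  List.takeWhile_eq_self_iff.mpr (fun x hx => by simp; rintro rfl; exact h hx)

theorem takeWhile_ne_length_lt (c : Char) (l : List Char) (h : c ∈ l) :
    (l.takeWhile (· != c)).length < l.length := by
  rcases Nat.lt_or_ge (l.takeWhile (· != c)).length l.length with hlt | hge
  · exact hlt
  · exfalso
    have hpre : l.takeWhile (· != c) <+: l :=
      ⟨l.dropWhile (· != c), List.takeWhile_append_dropWhile⟩
    have hle := hpre.length_le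
    have heq : l.takeWhile (· != c) = l :=
      List.IsPrefix.eq_of_length hpre (by omega)
    have := List.mem_takeWhile_imp (heq ▸ h)
    simp at this
theorem take_takeWhile_length (p : Char → Bool) (l : List Char) :
    l.take ((l.takeWhile p).length) = l.takeWhile p := by
  have hpre : l.takeWhile p <+: l := ⟨l.dropWhile p, List.takeWhile_append_dropWhile⟩
  exact (List.prefix_iff_eq_take.mp hpre).symm

-- ===== VERDICT (by name: the statement is the Claim_ definition above) =====
theorem get_assoc_spec : Claim_equal_get_assoc := by
  intro s _
  unfold Spec_get_assoc get_assoc get_assoc_alt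
  set cs := s.toList with hcs
  simp only [PySem.Str.find_eq, PySem.Str.findFrom_eq, ← hcs]
  have hu : ("_" : String).toList = ['_'] := rfl
  have hsp : (" " : String).toList = [' '] := rfl
  rw [hu, hsp]
  by_cases h1 : '_' ∈ cs
  · -- first underscore found
    set t1 := (cs.takeWhile (· != '_')).length with ht1
    have hf1 : PySem.Chars.find cs ['_'] = (t1 : Int) := find_singleton '_' cs h1
    have ht1lt : t1 < cs.length := takeWhile_ne_length_lt '_' cs h1
    rw [hf1]
    rw [if_neg (by omega)]
    have hi1 : skipLoop cs 0 = t1 := by rw [skipLoop_eq]; simp [ht1]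
    have hcast : (t1 : Int) + 1 = ((t1 + 1 : Nat) : Int) := by push_cast; ring
    rw [hcast, PySem.Chars.findFrom_natCast cs ['_'] (t1 + 1) (by omega)]

    by_cases h2 : '_' ∈ cs.drop (t1 + 1)
    · -- second underscore found
      set d := cs.drop (t1 + 1) with hd
      set t2 := (d.takeWhile (· != '_')).length with ht2
      have hf2 : PySem.Chars.find d ['_'] = (t2 : Int) := find_singleton '_' d h2
      have ht2lt : t2 < d.length := takeWhile_ne_length_lt '_' d h2
      rw [hf2, if_neg (show ¬((t2 : Int) = -1) by omega),
          if_neg (show ¬(((t1 + 1 : Nat) : Int) + (t2 : Int) < 0) by omega)]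
      have hdlen : d.length = cs.length - (t1 + 1) := by simp [hd]
      have hi2 : skipLoop cs (t1 + 1) = t1 + 1 + t2 := by rw [skipLoop_eq]
      set r := cs.drop (t1 + 1 + t2 + 1) with hr
      set rest := PySem.Str.slice s (some (((t1 + 1 : Nat) : Int) + (t2 : Int) + 1)) none with hrestdef
      have hrest : rest.toList = r := by
        rw [hrestdef, PySem.Str.toList_slice, PySem.Chars.slice_eq_listSlice, ← hcs]
        rw [show (((t1 + 1 : Nat) : Int) + (t2 : Int) + 1) = ((t1 + 1 + t2 + 1 : Nat) : Int) by push_cast; ring]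
        rw [PySem.List.slice_from_natCast]
      have hAval : collectLoop cs (skipLoop cs (skipLoop cs 0 + 1) + 1) [] = r.takeWhile (· != ' ') := by
        rw [hi1, hi2, collectLoop_eq]
        simp [hr]
      rw [hAval, hrest]
      by_cases h3 : ' ' ∈ r
      · set t3 := (r.takeWhile (· != ' ')).length with ht3
        have hf3 : PySem.Chars.find r [' '] = (t3 : Int) := find_singleton ' ' r h3
        rw [hf3, if_neg (show ¬((t3 : Int) < 0) by omega)]
        apply String.toList_inj.mp
        rw [PySem.Str.toList_slice, PySem.Chars.slice_eq_listSlice, hrest]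
        rw [PySem.List.slice_to r (by omega)]
        simp only [Int.toNat_natCast, String.toList_ofList]
        exact (take_takeWhile_length (· != ' ') r).symm
      · rw [find_singleton_none ' ' r h3, if_pos (show (-1 : Int) < 0 by norm_num)]
        apply String.toList_inj.mp
        rw [hrestdef, PySem.Str.toList_slice, PySem.Chars.slice_eq_listSlice, ← hcs]
        rw [show (((t1 + 1 : Nat) : Int) + (t2 : Int) + 1) = ((t1 + 1 + t2 + 1 : Nat) : Int) by push_cast; ring]
        rw [PySem.List.slice_from_natCast, String.toList_ofList]
        exact takeWhile_ne_all ' ' r h3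
    · -- no second underscore: A collects nothing, B returns ""
      rw [find_singleton_none '_' (cs.drop (t1 + 1)) h2, if_pos rfl,
          if_pos (show (-1 : Int) < 0 by norm_num)]
      have hdlen : (cs.drop (t1 + 1)).length = cs.length - (t1 + 1) := by simp
      have hi2 : skipLoop cs (t1 + 1) = cs.length := by
        rw [skipLoop_eq, takeWhile_ne_all '_' _ h2]; omega
      rw [hi1, hi2, collectLoop_eq, List.drop_of_length_le (by omega)]
      rfl
  · -- no underscore at all: A collects nothing, B returns ""
    rw [find_singleton_none '_' cs h1, if_pos (by omega)]
    have h0 : skipLoop cs 0 = cs.length := by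
      rw [skipLoop_eq]; simp [takeWhile_ne_all '_' cs h1]
    have h0' : skipLoop cs (cs.length + 1) = cs.length + 1 := by
      rw [skipLoop_eq, List.drop_of_length_le (by omega)]; simp
    rw [h0, h0', collectLoop_eq, List.drop_of_length_le (by omega)]
    rfl
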